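-- pv_equiv track=rewrite | github.com/asmundg/adventofcode | 2025/src/day_01.py | part1
-- ===== SOURCE A (Python) =====
-- def part1(steps: list[int]) -> int:
--     pos = 50
--     count = 0
--     for step in steps:
--         pos = (pos + step) % 100
--         if pos == 0:
--             count += 1
--     return count
-- ===== SOURCE B (Python) =====
-- def part1(steps: list[int]) -> int:
--     # Divide and conquer: go(chunk, pos) returns (zero-count over chunk starting
--     # at position pos, end position). Counts combine additively; the right half
--     # starts at the left half's end position. Correct because the walk over
--     # chunk = L + R is the walk over L followed by the walk over R from L's end.
--     def go(chunk, pos):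
--         if len(chunk) == 0:
--             return 0, pos
--         if len(chunk) == 1:
--             p = (pos + chunk[0]) % 100
--             return (1 if p == 0 else 0), p
--         mid = len(chunk) // 2
--         c1, p1 = go(chunk[:mid], pos)
--         c2, p2 = go(chunk[mid:], p1)
--         return c1 + c2, p2
--     return go(steps, 50)[0]
-- ===== Notes on version B (the rewrite author's own statement) =====
-- stated objective: alternative
-- what changed: Replaces the single imperative left-to-right scan by a recursive divide-and-conquer that splits the step list in half, returns (zero-count, end-position) pairs for each half and merges them (right half seeded with the left half's end position).
import Mathlib
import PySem

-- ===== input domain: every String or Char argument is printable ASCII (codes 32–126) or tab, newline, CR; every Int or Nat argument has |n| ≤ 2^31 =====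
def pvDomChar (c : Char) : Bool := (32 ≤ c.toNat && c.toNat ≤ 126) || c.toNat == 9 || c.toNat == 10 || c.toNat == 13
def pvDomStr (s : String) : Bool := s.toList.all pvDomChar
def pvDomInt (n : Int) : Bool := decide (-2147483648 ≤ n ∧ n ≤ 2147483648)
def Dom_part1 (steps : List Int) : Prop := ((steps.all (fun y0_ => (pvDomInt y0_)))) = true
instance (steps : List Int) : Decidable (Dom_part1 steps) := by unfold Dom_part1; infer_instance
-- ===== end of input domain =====

-- B replaces A's single imperative scan by a divide-and-conquer over halves of the
-- step list, merging (zero-count, end-position) pairs (alternative decomposition).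


-- ===== PORT A =====
def part1 (steps : List Int) : Int :=
  (steps.foldl
    (fun (st : Int × Int) step =>
      let pos := PySem.Int.mod (st.1 + step) 100
      (pos, if pos = 0 then st.2 + 1 else st.2))
    (50, 0)).2

-- ===== PORT B =====
-- go(chunk, pos): (zero-count over chunk starting at pos, end position).
-- fuel (= chunk.length at the top call) only makes the halving recursion
-- structural; it never changes the computation since length ≤ fuel throughout.
def pvGo : Nat → List Int → Int → Int × Int
  | 0, _, pos => (0, pos)
  | fuel+1, chunk, pos =>
    if chunk.length = 0 then (0, pos)
    else if chunk.length = 1 then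
      let p := PySem.Int.mod (pos + chunk.headI) 100   -- chunk[0]; chunk nonempty here
      ((if p = 0 then 1 else 0), p)
    else
      let mid := chunk.length / 2
      let r1 := pvGo fuel (chunk.take mid) pos
      let r2 := pvGo fuel (chunk.drop mid) r1.2
      (r1.1 + r2.1, r2.2)

def part1_alt (steps : List Int) : Int := (pvGo steps.length steps 50).1

-- ===== PRECONDITION & SPEC =====
def Spec_part1 (steps : List Int) (out : Int) : Prop := out = part1_alt steps
instance (steps : List Int) (out : Int) : Decidable (Spec_part1 steps out) := by unfold Spec_part1; infer_instance

-- ===== CLAIM (what is proved, stated in full; the proofs are below) =====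
def Claim_equal_part1 : Prop := ∀ (steps : List Int), Dom_part1 steps → Spec_part1 steps (part1 steps)

-- ===== LEMMAS AND PROOFS =====
-- A's loop body
def pvStep (st : Int × Int) (step : Int) : Int × Int :=
  let pos := PySem.Int.mod (st.1 + step) 100
  (pos, if pos = 0 then st.2 + 1 else st.2)

-- count component of A's fold is an offset of the count started at 0
theorem pvFold_offset (l : List Int) : ∀ pos c,
    l.foldl pvStep (pos, c) = ((l.foldl pvStep (pos, 0)).1, c + (l.foldl pvStep (pos, 0)).2) := by
  induction l with
  | nil => intro pos c; simp
  | cons s rest ih =>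
    intro pos c
    simp only [List.foldl_cons, pvStep]
    rw [ih _ (if PySem.Int.mod (pos + s) 100 = 0 then c + 1 else c),
        ih _ (if PySem.Int.mod (pos + s) 100 = 0 then 0 + 1 else 0)]
    simp only [Prod.mk.injEq]
    refine ⟨trivial, ?_⟩
    split_ifs <;> ring

-- pvGo computes exactly A's fold (count, end position) from any start position
theorem pvGo_eq : ∀ (fuel : Nat) (chunk : List Int), chunk.length ≤ fuel → ∀ pos : Int,
    pvGo fuel chunk pos = ((chunk.foldl pvStep (pos, 0)).2, (chunk.foldl pvStep (pos, 0)).1) := by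
  intro fuel
  induction fuel with
  | zero =>
    intro chunk hlen pos
    have he : chunk = [] := List.length_eq_zero_iff.mp (Nat.le_zero.mp hlen)
    subst he; simp [pvGo]
  | succ fuel ih =>
    intro chunk hlen pos
    by_cases h0 : chunk.length = 0
    · have he : chunk = [] := List.length_eq_zero_iff.mp h0
      subst he; simp [pvGo]
    · by_cases h1 : chunk.length = 1
      · obtain ⟨a, ha⟩ := List.length_eq_one_iff.mp h1
        subst ha; simp [pvGo, pvStep]
      · have hm2 : 2 ≤ chunk.length := by omega
        have htl : (chunk.take (chunk.length / 2)).length ≤ fuel := by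
          simp only [List.length_take]; omega
        have hdl : (chunk.drop (chunk.length / 2)).length ≤ fuel := by
          simp only [List.length_drop]; omega
        show (if chunk.length = 0 then ((0 : Int), pos)
          else if chunk.length = 1 then
            ((if PySem.Int.mod (pos + chunk.headI) 100 = 0 then (1 : Int) else 0),
              PySem.Int.mod (pos + chunk.headI) 100)
          else
            ((pvGo fuel (chunk.take (chunk.length / 2)) pos).1
                + (pvGo fuel (chunk.drop (chunk.length / 2))
                    (pvGo fuel (chunk.take (chunk.length / 2)) pos).2).1,
              (pvGo fuel (chunk.drop (chunk.length / 2))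
                (pvGo fuel (chunk.take (chunk.length / 2)) pos).2).2)) = _
        rw [if_neg h0, if_neg h1]
        rw [ih _ htl _, ih _ hdl _]
        have hsplit : chunk.foldl pvStep (pos, 0)
            = (chunk.drop (chunk.length / 2)).foldl pvStep
                ((chunk.take (chunk.length / 2)).foldl pvStep (pos, 0)) := by
          conv_lhs => rw [← List.take_append_drop (chunk.length / 2) chunk]
          rw [List.foldl_append]
        rw [hsplit]
        rw [pvFold_offset _ ((chunk.take (chunk.length / 2)).foldl pvStep (pos, 0)).1
            ((chunk.take (chunk.length / 2)).foldl pvStep (pos, 0)).2]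

-- ===== VERDICT (by name: the statement is the Claim_ definition above) =====
theorem part1_spec : Claim_equal_part1 := by
  intro steps _
  show part1 steps = part1_alt steps
  unfold part1 part1_alt
  rw [pvGo_eq steps.length steps le_rfl]
  rfl
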